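-- pv_equiv track=rewrite | github.com/pypi-data/pypi-mirror-399 | packages/oxutils/oxutils-0.1.11-py3-none-any.whl/oxutils/permissions/actions.py | collapse_actions
-- ===== SOURCE A (Python) =====
-- ACTION_HIERARCHY = {
--     "r": set(),            # read
--     "w": {"r"},            # write ⇒ read
--     "u": {"r"},            # update ⇒ read
--     "d": {"r", "w"},       # delete ⇒ write ⇒ read
--     "a": {"r"},            # approve ⇒ read
-- }
--
-- def collapse_actions(actions: list[str]) -> set[str]:
--     """
--     ['d','w','r'] -> {'d'}
--     ['w','r']     -> {'w'}
--     ['r']         -> {'r'}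
--     """
--     actions = set(actions)
--     roots = set(actions)
--
--     # Remove all implied actions from roots
--     for action in list(roots):
--         if action in ACTION_HIERARCHY:
--             implied = ACTION_HIERARCHY[action]
--             roots -= implied
--
--     return roots
-- ===== SOURCE B (Python) =====
-- ACTION_HIERARCHY = {
--     "r": set(),            # read
--     "w": {"r"},            # write => read
--     "u": {"r"},            # update => read
--     "d": {"r", "w"},       # delete => write => read
--     "a": {"r"},            # approve => read
-- }
--
-- # Reverse index built once: IMPLIED_BY[x] = the actions that imply x.
-- IMPLIED_BY = {}
-- for _y, _implied in ACTION_HIERARCHY.items():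
--     for _x in _implied:
--         IMPLIED_BY.setdefault(_x, set()).add(_y)
--
-- def collapse_actions(actions: list[str]) -> set[str]:
--     # Single pass keeping the current maximal (un-implied) actions in an
--     # insertion-ordered dict; valid because the hierarchy is transitive
--     # and irreflexive.
--     kept = {}
--     for x in actions:
--         if x in kept or any(y in kept for y in IMPLIED_BY.get(x, ())):
--             continue
--         for y in ACTION_HIERARCHY.get(x, ()):
--             kept.pop(y, None)
--         kept[x] = None
--     return set(kept)
-- ===== Notes on version B (the rewrite author's own statement) =====
-- stated objective: alternative
-- what changed: A dedups into a set and then repeatedly subtracts each present action's implied set from a roots copy; B makes a single left-to-right pass over the raw list keeping the current maximal actions in an insertion-ordered dict (skip an action already kept or implied by a kept one via a precomputed reverse index, otherwise evict the kept actions it implies and insert it), correct because the fixed hierarchy is transitive and irreflexive.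
import Mathlib
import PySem

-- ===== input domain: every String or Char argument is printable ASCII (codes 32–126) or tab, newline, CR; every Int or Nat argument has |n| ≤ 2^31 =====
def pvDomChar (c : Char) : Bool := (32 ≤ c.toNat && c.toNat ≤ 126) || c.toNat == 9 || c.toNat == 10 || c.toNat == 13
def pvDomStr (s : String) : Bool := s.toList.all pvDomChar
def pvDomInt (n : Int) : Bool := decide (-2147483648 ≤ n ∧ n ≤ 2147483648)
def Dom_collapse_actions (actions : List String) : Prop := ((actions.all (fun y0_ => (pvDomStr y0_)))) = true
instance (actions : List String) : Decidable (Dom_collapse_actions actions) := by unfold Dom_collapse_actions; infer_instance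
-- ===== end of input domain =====

-- B replaces A's "dedup, then repeatedly subtract each action's implied set" by a single left-to-right
-- pass over the raw input keeping the current maximal (un-implied) actions in an insertion-ordered dict,
-- with a reverse index built once for the "is it implied by a kept action?" test; this is correct because
-- the fixed hierarchy is transitive and irreflexive. Both Pythons return a set; the ports return its
-- distinct elements (first-occurrence order), compared as a set.

-- ===== PORT A =====
def actionHierarchy : PySem.Dict String (List String) :=
  ⟨[("r", []), ("w", ["r"]), ("u", ["r"]), ("d", ["r", "w"]), ("a", ["r"])]⟩

def collapse_actions (actions : List String) : List String :=
  let s := PySem.Set.ofList actions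
  -- for action in list(roots): if action in ACTION_HIERARCHY: roots -= ACTION_HIERARCHY[action]
  s.foldl (fun roots action =>
    match PySem.Dict.get? actionHierarchy action with
    | some implied => PySem.Set.diff roots implied
    | none => roots) s

-- ===== PORT B =====
-- IMPLIED_BY, the reverse index built once at module load ("r" first encountered, then "w")
def impliedByRev : PySem.Dict String (List String) :=
  ⟨[("r", ["w", "u", "d", "a"]), ("w", ["d"])]⟩

def collapse_actions_alt (actions : List String) : List String :=
  PySem.Set.ofList
    (actions.foldl (fun kept x =>
      if kept.contains x || (PySem.Dict.getD impliedByRev x []).any (fun y => kept.contains y)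
      then kept
      else ((PySem.Dict.getD actionHierarchy x []).foldl (fun d y => d.erase y) kept).insert x ())
      PySem.Dict.empty).keys

-- ===== PRECONDITION & SPEC =====
def Spec_collapse_actions (actions : List String) (out : List String) : Prop := out = collapse_actions_alt actions
instance (actions : List String) (out : List String) : Decidable (Spec_collapse_actions actions out) := by unfold Spec_collapse_actions; infer_instance

-- ===== CLAIM (what is proved, stated in full; the proofs are below) =====
def Claim_equal_collapse_actions : Prop := ∀ (actions : List String), Dom_collapse_actions actions → Spec_collapse_actions actions (collapse_actions actions)

-- ===== LEMMAS AND PROOFS =====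

-- "x in ACTION_HIERARCHY.get(y, ())"
def impliedBy (y x : String) : Bool := (PySem.Dict.getD actionHierarchy y []).contains x

-- The common normal form both ports reach: the first occurrences of the
-- input's elements that no input element implies.
def maxima (l : List String) : List String :=
  (PySem.Set.ofList l).filter (fun a => ! l.any (fun b => impliedBy b a))

-- `impliedBy` enumerated (only five pairs of the fixed hierarchy are related).
theorem impliedBy_cases {b a : String} (h : impliedBy b a = true) :
    (b = "w" ∧ a = "r") ∨ (b = "u" ∧ a = "r") ∨ (b = "d" ∧ a = "r") ∨
    (b = "d" ∧ a = "w") ∨ (b = "a" ∧ a = "r") := by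
  by_cases h1 : "r" = b
  · subst h1
    simp [impliedBy, actionHierarchy, PySem.Dict.getD, PySem.Dict.get?] at h
  by_cases h2 : "w" = b
  · subst h2
    simp [impliedBy, actionHierarchy, PySem.Dict.getD, PySem.Dict.get?] at h
    simp [h]
  by_cases h3 : "u" = b
  · subst h3
    simp [impliedBy, actionHierarchy, PySem.Dict.getD, PySem.Dict.get?] at h
    simp [h]
  by_cases h4 : "d" = b
  · subst h4
    simp [impliedBy, actionHierarchy, PySem.Dict.getD, PySem.Dict.get?] at h
    rcases h with h | h <;> simp [h]
  by_cases h5 : "a" = b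
  · subst h5
    simp [impliedBy, actionHierarchy, PySem.Dict.getD, PySem.Dict.get?] at h
    simp [h]
  · have e1 : ("r" == b) = false := beq_eq_false_iff_ne.mpr h1
    have e2 : ("w" == b) = false := beq_eq_false_iff_ne.mpr h2
    have e3 : ("u" == b) = false := beq_eq_false_iff_ne.mpr h3
    have e4 : ("d" == b) = false := beq_eq_false_iff_ne.mpr h4
    have e5 : ("a" == b) = false := beq_eq_false_iff_ne.mpr h5
    simp [impliedBy, actionHierarchy, PySem.Dict.getD, PySem.Dict.get?, List.find?,
      e1, e2, e3, e4, e5] at h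

theorem impliedBy_irrefl (x : String) : impliedBy x x = false := by
  by_contra h
  rcases impliedBy_cases (by simpa using h) with ⟨h1, h2⟩ | ⟨h1, h2⟩ | ⟨h1, h2⟩ | ⟨h1, h2⟩ | ⟨h1, h2⟩ <;>
    simp_all

theorem impliedBy_trans {y x a : String} (h1 : impliedBy y x = true)
    (h2 : impliedBy x a = true) : impliedBy y a = true := by
  have hx : x = "r" ∨ x = "w" := by
    rcases impliedBy_cases h1 with ⟨_, e⟩ | ⟨_, e⟩ | ⟨_, e⟩ | ⟨_, e⟩ | ⟨_, e⟩ <;> simp [e]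
  rcases hx with rfl | rfl
  · -- "r" implies nothing
    simp [impliedBy, actionHierarchy, PySem.Dict.getD, PySem.Dict.get?] at h2
  · -- x = "w": then a = "r" and y = "d", and "d" does imply "r"
    have ha : a = "r" := by
      rcases impliedBy_cases h2 with ⟨e, f⟩ | ⟨e, f⟩ | ⟨e, f⟩ | ⟨e, f⟩ | ⟨e, f⟩ <;>
        first | exact f | exact absurd e (by decide)
    have hy : y = "d" := by
      rcases impliedBy_cases h1 with ⟨e, f⟩ | ⟨e, f⟩ | ⟨e, f⟩ | ⟨e, f⟩ | ⟨e, f⟩ <;>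
        first | exact e | exact absurd f (by decide)
    subst ha; subst hy
    decide

-- Nothing implies "u", "d" or "a"; implied elements are only "r" and "w".
theorem impliedBy_snd {b a : String} (h : impliedBy b a = true) : a = "r" ∨ a = "w" := by
  rcases impliedBy_cases h with ⟨_, h2⟩ | ⟨_, h2⟩ | ⟨_, h2⟩ | ⟨_, h2⟩ | ⟨_, h2⟩ <;> simp [h2]

-- Anything implied by a present action is implied by a present MAXIMAL action.
theorem dominated_by_maximum {l : List String} {b x : String} (hb : b ∈ l)
    (hd : impliedBy b x = true) :
    ∃ y ∈ l, (∀ c ∈ l, impliedBy c y = false) ∧ impliedBy y x = true := by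
  by_cases hmax : ∀ c ∈ l, impliedBy c b = false
  · exact ⟨b, hb, hmax, hd⟩
  · rw [not_forall] at hmax
    simp only [not_forall, exists_prop] at hmax
    obtain ⟨c, hc, hcb⟩ := hmax
    simp only [Bool.not_eq_false] at hcb
    refine ⟨c, hc, ?_, impliedBy_trans hcb hd⟩
    intro e _
    by_contra he
    simp only [Bool.not_eq_false] at he
    -- c implies b, so b ∈ {"r","w"}; b implies x, so b ∈ {"w","u","d","a"}; hence b = "w", c = "d";
    -- and c is implied by e, so c ∈ {"r","w"} — contradiction with c = "d".
    have hb2 : b = "w" := by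
      rcases impliedBy_snd hcb with rfl | rfl
      · -- b = "r", but b implies x and "r" implies nothing
        simp [impliedBy, actionHierarchy, PySem.Dict.getD, PySem.Dict.get?] at hd
      · rfl
    subst hb2
    have hc2 : c = "d" := by
      rcases impliedBy_cases hcb with ⟨e, f⟩ | ⟨e, f⟩ | ⟨e, f⟩ | ⟨e, f⟩ | ⟨e, f⟩ <;>
        first | exact e | exact absurd f (by decide)
    subst hc2
    rcases impliedBy_snd he with g | g <;> exact absurd g (by decide)

theorem mem_maxima {l : List String} {a : String} :
    a ∈ maxima l ↔ a ∈ PySem.Set.ofList l ∧ ∀ b ∈ l, impliedBy b a = false := by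
  simp [maxima, List.mem_filter]

-- A's per-action step is a filter by "not implied by this action".
theorem collapse_step_eq_filter (r : List String) (b : String) :
    (match PySem.Dict.get? actionHierarchy b with
     | some implied => PySem.Set.diff r implied
     | none => r)
    = r.filter (fun a => ! impliedBy b a) := by
  cases h : PySem.Dict.get? actionHierarchy b with
  | some imp => simp [PySem.Set.diff, impliedBy, PySem.Dict.getD, h]
  | none => simp [impliedBy, PySem.Dict.getD, h, List.filter_true]

-- Folding per-element filters is one filter by the conjunction (negated any).
theorem foldl_filter_eq_filter_any {α β : Type} (q : β → α → Bool) :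
    ∀ (l : List β) (s : List α),
      l.foldl (fun r b => r.filter (fun a => ! q b a)) s
        = s.filter (fun a => ! l.any (fun b => q b a)) := by
  intro l
  induction l with
  | nil => intro s; simp
  | cons b l ih =>
    intro s
    simp only [List.foldl_cons, ih, List.filter_filter, List.any_cons]
    apply List.filter_congr
    intro a _
    cases q b a <;> simp

theorem any_ofList {l : List String} (p : String → Bool) :
    (PySem.Set.ofList l).any p = l.any p := by
  rw [Bool.eq_iff_iff]
  simp only [List.any_eq_true, PySem.Set.mem_ofList]

-- A computes the maxima.
theorem collapse_actions_eq_maxima (l : List String) :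
    collapse_actions l = maxima l := by
  unfold collapse_actions maxima
  simp only [collapse_step_eq_filter]
  rw [foldl_filter_eq_filter_any (fun b a => impliedBy b a)]
  apply List.filter_congr
  intro a _
  rw [any_ofList]

-- B's loop step, applied to the maxima of the processed prefix, yields the
-- maxima of the prefix extended by the new action.
theorem maxima_step (l : List String) (x : String) :
    (if (maxima l).contains x || (maxima l).any (fun y => impliedBy y x)
     then maxima l
     else ((maxima l).filter (fun y => ! impliedBy x y)) ++ [x])
    = maxima (l ++ [x]) := by
  have hsub : ∀ a, a ∈ maxima l → a ∈ l := fun a ha =>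
    (PySem.Set.mem_ofList l a).mp (mem_maxima.mp ha).1
  by_cases hdom : ∃ b ∈ l, impliedBy b x = true
  · -- x is implied by the prefix: B skips it, and it is not maximal.
    obtain ⟨b, hb, hbx⟩ := hdom
    obtain ⟨y, hy, hymax, hyx⟩ := dominated_by_maximum hb hbx
    have hyk : y ∈ maxima l := mem_maxima.mpr ⟨(PySem.Set.mem_ofList l y).mpr hy, hymax⟩
    have hany : (maxima l).any (fun y => impliedBy y x) = true :=
      List.any_eq_true.mpr ⟨y, hyk, hyx⟩
    rw [hany, Bool.or_true, if_pos rfl]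
    unfold maxima
    rw [PySem.Set.ofList_append_singleton, PySem.Set.add_eq_ite]
    have hfilt : List.filter (fun a => ! l.any fun c => impliedBy c a) (PySem.Set.ofList l)
        = List.filter (fun a => ! (l ++ [x]).any fun c => impliedBy c a) (PySem.Set.ofList l) := by
      apply List.filter_congr
      intro a _
      by_cases hla : l.any (fun c => impliedBy c a) = true
      · simp [hla, List.any_append]
      · have hxa : impliedBy x a = false := by
          by_contra hxa
          rw [Bool.not_eq_false] at hxa
          exact hla (List.any_eq_true.mpr ⟨b, hb, impliedBy_trans hbx hxa⟩)
        simp [List.any_append, hla, hxa]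
    split_ifs with hmem
    · exact hfilt
    · have hx : (l ++ [x]).any (fun c => impliedBy c x) = true := by
        rw [List.any_append]
        exact Bool.or_eq_true_iff.mpr (Or.inl (List.any_eq_true.mpr ⟨b, hb, hbx⟩))
      rw [List.filter_append, hfilt,
        List.filter_cons_of_neg (by simp [hx]), List.filter_nil, List.append_nil]
  · -- x is implied by nothing in the prefix.
    simp only [not_exists, not_and] at hdom
    have hnoany : (maxima l).any (fun y => impliedBy y x) = false := by
      rw [Bool.eq_false_iff]
      intro h
      obtain ⟨y, hy, hyx⟩ := List.any_eq_true.mp h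
      exact absurd hyx (by simp [hdom y (hsub y hy)])
    by_cases hxl : x ∈ l
    · -- duplicate of an earlier action (itself maximal): skip; maxima unchanged.
      have hxmax : x ∈ maxima l := mem_maxima.mpr
        ⟨(PySem.Set.mem_ofList l x).mpr hxl, fun c hc => by simpa using hdom c hc⟩
      rw [List.contains_eq_mem, decide_eq_true (by exact hxmax), Bool.true_or, if_pos rfl]
      unfold maxima
      rw [PySem.Set.ofList_append_singleton, PySem.Set.add_of_mem ((PySem.Set.mem_ofList l x).mpr hxl)]
      apply List.filter_congr
      intro a _
      have hxa : impliedBy x a = true → l.any (fun c => impliedBy c a) = true :=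
        fun h => List.any_eq_true.mpr ⟨x, hxl, h⟩
      by_cases hla : l.any (fun c => impliedBy c a) = true
      · simp [hla]
      · have : impliedBy x a = false := by
          by_contra hxa'
          rw [Bool.not_eq_false] at hxa'
          exact hla (hxa hxa')
        simp [List.any_append, hla, this]
    · -- new maximal action: drop the kept ones it implies and append it.
      have hxk : (maxima l).contains x = false := by
        rw [Bool.eq_false_iff]
        intro h
        exact hxl (hsub x (by simpa [List.contains_eq_mem] using h))
      rw [hxk, hnoany, Bool.or_false, if_neg (by simp)]
      unfold maxima
      rw [PySem.Set.ofList_append_singleton,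
          PySem.Set.add_of_not_mem (fun h => hxl ((PySem.Set.mem_ofList l x).mp h))]
      rw [List.filter_append, List.filter_filter]
      have hx : (! (l ++ [x]).any fun c => impliedBy c x) = true := by
        simp [List.any_append, impliedBy_irrefl]
        intro b hb
        simpa using hdom b hb
      have : List.filter (fun a => ! (l ++ [x]).any fun c => impliedBy c a) [x] = [x] := by
        simp only [List.filter_cons, hx, List.filter_nil]
        rfl
      rw [this]
      congr 1
      apply List.filter_congr
      intro a _
      simp only [List.any_append, List.any_cons, List.any_nil, Bool.or_false]
      cases h1 : l.any (fun c => impliedBy c a) <;> cases h2 : impliedBy x a <;> simp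

-- Erasing a key filters it out of the key list.
theorem keys_erase (d : PySem.Dict String Unit) (k : String) :
    (d.erase k).keys = d.keys.filter (fun y => y != k) := by
  unfold PySem.Dict.erase PySem.Dict.keys
  simp only [List.filter_map]
  congr 1

-- The eviction loop filters the kept keys by "not implied by x".
theorem keys_foldl_erase (imp : List String) :
    ∀ d : PySem.Dict String Unit,
      (imp.foldl (fun d y => d.erase y) d).keys
        = d.keys.filter (fun y => ! imp.contains y) := by
  induction imp with
  | nil => intro d; simp
  | cons k imp ih =>
    intro d
    simp only [List.foldl_cons, ih, keys_erase, List.filter_filter]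
    apply List.filter_congr
    intro y _
    simp only [List.contains_cons]
    cases h : y == k <;> simp [bne, h]

-- `impliedBy` as an explicit pair list (the converse of impliedBy_cases).
theorem impliedBy_iff {y x : String} :
    impliedBy y x = true ↔
      ((y = "w" ∧ x = "r") ∨ (y = "u" ∧ x = "r") ∨ (y = "d" ∧ x = "r") ∨
       (y = "d" ∧ x = "w") ∨ (y = "a" ∧ x = "r")) := by
  constructor
  · exact impliedBy_cases
  · rintro (⟨rfl, rfl⟩ | ⟨rfl, rfl⟩ | ⟨rfl, rfl⟩ | ⟨rfl, rfl⟩ | ⟨rfl, rfl⟩) <;> decide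

-- The reverse index is exact: y ∈ IMPLIED_BY.get(x, ()) iff y implies x.
theorem mem_impliedByRev {x y : String} :
    y ∈ PySem.Dict.getD impliedByRev x [] ↔ impliedBy y x = true := by
  rw [impliedBy_iff]
  constructor
  · intro h
    by_cases h1 : "r" = x
    · subst h1
      simp [impliedByRev, PySem.Dict.getD, PySem.Dict.get?] at h
      rcases h with rfl | rfl | rfl | rfl <;> decide
    by_cases h2 : "w" = x
    · subst h2
      simp [impliedByRev, PySem.Dict.getD, PySem.Dict.get?] at h
      subst h
      decide
    · have e1 : ("r" == x) = false := beq_eq_false_iff_ne.mpr h1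
      have e2 : ("w" == x) = false := beq_eq_false_iff_ne.mpr h2
      simp [impliedByRev, PySem.Dict.getD, PySem.Dict.get?, e1, e2] at h
  · rintro (⟨rfl, rfl⟩ | ⟨rfl, rfl⟩ | ⟨rfl, rfl⟩ | ⟨rfl, rfl⟩ | ⟨rfl, rfl⟩) <;> decide

-- One dict step of B's loop, seen on the key list.
theorem dict_step_keys (kept : PySem.Dict String Unit) (x : String) :
    (if kept.contains x || (PySem.Dict.getD impliedByRev x []).any (fun y => kept.contains y)
     then kept
     else ((PySem.Dict.getD actionHierarchy x []).foldl (fun d y => d.erase y) kept).insert x ()).keys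
    = (if kept.keys.contains x || kept.keys.any (fun y => impliedBy y x)
       then kept.keys
       else (kept.keys.filter (fun y => ! impliedBy x y)) ++ [x]) := by
  have hc : ∀ k, kept.contains k = kept.keys.contains k := by
    intro k
    rw [PySem.Dict.contains_eq_decide_mem_keys, List.contains_eq_mem]
  have hany : (PySem.Dict.getD impliedByRev x []).any (fun y => kept.contains y)
      = kept.keys.any (fun y => impliedBy y x) := by
    rw [Bool.eq_iff_iff]
    simp only [List.any_eq_true, hc, List.contains_eq_mem, decide_eq_true_eq]
    constructor
    · rintro ⟨y, hy, hk⟩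
      exact ⟨y, hk, mem_impliedByRev.mp hy⟩
    · rintro ⟨y, hk, hy⟩
      exact ⟨y, mem_impliedByRev.mpr hy, hk⟩
  rw [hc, hany]
  split_ifs with hcond
  · rfl
  · have hx : ((PySem.Dict.getD actionHierarchy x []).foldl (fun d y => d.erase y) kept).contains x
        = false := by
      rw [PySem.Dict.contains_eq_decide_mem_keys, keys_foldl_erase, decide_eq_false_iff_not]
      intro hmem
      have hxk : x ∈ kept.keys := List.mem_of_mem_filter hmem
      simp only [Bool.or_eq_true, not_or] at hcond
      exact hcond.1 (by rw [List.contains_eq_mem]; exact decide_eq_true hxk)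
    rw [PySem.Dict.keys_insert_of_not_contains (h := hx), keys_foldl_erase]
    rfl

-- B computes the maxima.
theorem collapse_actions_alt_eq_maxima (l : List String) :
    collapse_actions_alt l = maxima l := by
  have hkeys : ∀ m : List String,
      (m.foldl (fun kept x =>
        if kept.contains x || (PySem.Dict.getD impliedByRev x []).any (fun y => kept.contains y)
        then kept
        else ((PySem.Dict.getD actionHierarchy x []).foldl (fun d y => d.erase y) kept).insert x ())
        PySem.Dict.empty).keys = maxima m := by
    intro m
    induction m using List.reverseRecOn with
    | nil => rfl
    | append_singleton m x ih =>
      rw [List.foldl_append, List.foldl_cons, List.foldl_nil, dict_step_keys, ih, ← maxima_step]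
  have hnd : (maxima l).Nodup := List.Nodup.filter _ (PySem.Set.nodup_ofList l)
  unfold collapse_actions_alt
  rw [hkeys l]
  exact PySem.Set.ofList_eq_self_of_nodup _ hnd

-- ===== VERDICT (by name: the statement is the Claim_ definition above) =====
theorem collapse_actions_spec : Claim_equal_collapse_actions := by
  intro actions _
  unfold Spec_collapse_actions
  rw [collapse_actions_eq_maxima, collapse_actions_alt_eq_maxima]
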